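-- pv_equiv track=rewrite | github.com/thenudds/recruitment-sourcer | proxycurl_client.py | extract_company_names
-- ===== SOURCE A (Python) =====
-- def extract_company_names(
--     profile: dict,
--     target_domain: str,
--     keyword: str
-- ) -> dict:
--     """
--     Given a full profile dict, walk through 'experiences' and
--     return two lists of company names: those that appear BEFORE
--     the person joined the target company and those AFTER.
--
--     Proxycurl returns experiences ordered most-recent-first.
--     So index 0 = current/most recent job.
--
--     Returns:
--         {
--             "before": ["Company A", "Company B"],  # prior employers
--             "after":  ["Company X"],               # subsequent employers
--             "all":    [...]                         # everything (excl. target)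
--         }
--     """
--     experiences = profile.get("experiences") or []
--     target_slug = target_domain.split(".")[0].lower()
--
--     # Find the index of the target company in the experience list
--     target_idx = None
--     for i, exp in enumerate(experiences):
--         comp = (exp.get("company") or "").lower()
--         if target_slug in comp:
--             target_idx = i
--             break
--
--     before, after = [], []
--
--     for i, exp in enumerate(experiences):
--         comp_name = exp.get("company")
--         if not comp_name:
--             continue
--         comp_lower = comp_name.lower()
--         if target_slug in comp_lower:
--             continue  # skip the target company itself
--
--         if target_idx is None:
--             # Can't determine order — add to 'all' only
--             after.append(comp_name)
--         elif i < target_idx: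
--             # More recent than target → worked there AFTER leaving target
--             after.append(comp_name)
--         else:
--             # Older than target → worked there BEFORE joining target
--             before.append(comp_name)
--
--     return {
--         "before": before,
--         "after": after,
--         "all": before + after,
--     }
-- ===== SOURCE B (Python) =====
-- def extract_company_names(
--     profile: dict,
--     target_domain: str,
--     keyword: str
-- ) -> dict:
--     """Single-pass bucketing: a running seen_target flag replaces the
--     precomputed target index."""
--     target_slug = target_domain.split(".")[0].lower()
--     before, after = [], []
--     seen_target = False
--     for exp in (profile.get("experiences") or []):
--         comp_name = exp.get("company")
--         if target_slug in (comp_name or "").lower():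
--             seen_target = True
--             continue
--         if not comp_name:
--             continue
--         if seen_target:
--             before.append(comp_name)
--         else:
--             after.append(comp_name)
--     return {
--         "before": before,
--         "after": after,
--         "all": before + after,
--     }
-- ===== Notes on version B (the rewrite author's own statement) =====
-- stated objective: simpler
-- what changed: Replaced A's two scans (first find the target company's index, then classify every entry by comparing its position to that index) with a single pass that carries a seen_target flag flipped at the first slug match.
import Mathlib
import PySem

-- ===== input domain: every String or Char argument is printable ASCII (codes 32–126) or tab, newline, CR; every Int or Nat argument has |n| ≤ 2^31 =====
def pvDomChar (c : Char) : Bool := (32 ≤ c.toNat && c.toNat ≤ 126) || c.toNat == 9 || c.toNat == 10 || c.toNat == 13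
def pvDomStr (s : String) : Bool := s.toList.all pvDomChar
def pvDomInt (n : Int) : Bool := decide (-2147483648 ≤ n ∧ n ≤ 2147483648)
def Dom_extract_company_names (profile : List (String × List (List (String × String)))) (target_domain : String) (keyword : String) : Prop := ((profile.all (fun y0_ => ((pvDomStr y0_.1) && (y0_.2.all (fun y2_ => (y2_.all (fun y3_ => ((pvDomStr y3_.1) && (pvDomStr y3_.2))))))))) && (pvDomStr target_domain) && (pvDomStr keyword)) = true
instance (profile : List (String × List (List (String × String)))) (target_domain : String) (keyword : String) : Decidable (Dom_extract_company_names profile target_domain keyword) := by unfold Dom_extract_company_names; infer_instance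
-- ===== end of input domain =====

-- B replaces A's two scans (find the target's index, then classify each entry by
-- comparing its index) with ONE pass that carries a seen_target flag (objective: simpler).

-- ===== PORT A =====
-- A's first loop: find the index of the first experience whose lowered company
-- name contains the slug ('break' = stop at the first hit).
def ecn_findTarget (slug : String) : List (List (String × String)) → Nat → Option Nat
  | [], _ => none
  | exp :: rest, i =>
    -- comp = (exp.get("company") or "").lower(); 'or ""' = getD "" (None and "" both give "")
    let comp := PySem.Str.lower (((PySem.Dict.mk exp).get? "company").getD "")
    if PySem.Str.isIn slug comp then some i else ecn_findTarget slug rest (i + 1)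

-- A's second loop: classify each non-falsy, non-target company by i < target_idx.
def ecn_classify (slug : String) (target_idx : Option Nat) :
    List (List (String × String)) → Nat → List String × List String
  | [], _ => ([], [])
  | exp :: rest, i =>
    let comp_name := (PySem.Dict.mk exp).get? "company"
    if comp_name = none ∨ comp_name = some "" then      -- if not comp_name: continue
      ecn_classify slug target_idx rest (i + 1)
    else
      let name := comp_name.getD ""
      if PySem.Str.isIn slug (PySem.Str.lower name) then -- skip the target company itself
        ecn_classify slug target_idx rest (i + 1)
      else
        let r := ecn_classify slug target_idx rest (i + 1)
        match target_idx with
        | none => (r.1, name :: r.2)                     -- after.append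
        | some ti => if i < ti then (r.1, name :: r.2) else (name :: r.1, r.2)

def extract_company_names (profile : List (String × List (List (String × String)))) (target_domain : String) (keyword : String) : List (String × List String) :=
  -- profile.get("experiences") or []: 'or []' = getD [] (None and [] both give [])
  let experiences := ((PySem.Dict.mk profile).get? "experiences").getD []
  -- target_domain.split(".")[0].lower(); split? with "." is always some nonempty, defaults unreachable
  let target_slug := PySem.Str.lower ((PySem.List.pyGet? ((PySem.Str.split? target_domain ".").getD []) 0).getD "")
  let target_idx := ecn_findTarget target_slug experiences 0
  let r := ecn_classify target_slug target_idx experiences 0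
  [("before", r.1), ("after", r.2), ("all", r.1 ++ r.2)]

-- ===== PORT B =====
-- B's single loop: the seen flag flips at the first slug match and decides the bucket.
def ecn_onepass (slug : String) (seen : Bool) : List (List (String × String)) → List String × List String
  | [] => ([], [])
  | exp :: rest =>
    let comp_name := (PySem.Dict.mk exp).get? "company"
    if PySem.Str.isIn slug (PySem.Str.lower (comp_name.getD "")) then
      ecn_onepass slug true rest                        -- seen_target = True; continue
    else if comp_name = none ∨ comp_name = some "" then -- if not comp_name: continue
      ecn_onepass slug seen rest
    else
      let name := comp_name.getD ""
      let r := ecn_onepass slug seen rest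
      if seen then (name :: r.1, r.2) else (r.1, name :: r.2)

def extract_company_names_alt (profile : List (String × List (List (String × String)))) (target_domain : String) (keyword : String) : List (String × List String) :=
  let target_slug := PySem.Str.lower ((PySem.List.pyGet? ((PySem.Str.split? target_domain ".").getD []) 0).getD "")
  let experiences := ((PySem.Dict.mk profile).get? "experiences").getD []
  let r := ecn_onepass target_slug false experiences
  [("before", r.1), ("after", r.2), ("all", r.1 ++ r.2)]

-- ===== PRECONDITION & SPEC =====
def Spec_extract_company_names (profile : List (String × List (List (String × String)))) (target_domain : String) (keyword : String) (out : List (String × List String)) : Prop := out = extract_company_names_alt profile target_domain keyword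
instance (profile : List (String × List (List (String × String)))) (target_domain : String) (keyword : String) (out : List (String × List String)) : Decidable (Spec_extract_company_names profile target_domain keyword out) := by unfold Spec_extract_company_names; infer_instance

-- ===== CLAIM (what is proved, stated in full; the proofs are below) =====
def Claim_equal_extract_company_names : Prop := ∀ (profile : List (String × List (List (String × String)))) (target_domain : String) (keyword : String), Dom_extract_company_names profile target_domain keyword → Spec_extract_company_names profile target_domain keyword (extract_company_names profile target_domain keyword)

-- ===== LEMMAS AND PROOFS =====

-- findTarget from base index i never returns an index below i
theorem ecn_findTarget_ge (slug : String) (es : List (List (String × String))) (i t : Nat)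
    (h : ecn_findTarget slug es i = some t) : i ≤ t := by
  induction es generalizing i with
  | nil => simp [ecn_findTarget] at h
  | cons e rest ih =>
    simp only [ecn_findTarget] at h
    split at h
    · simp only [Option.some.injEq] at h; omega
    · have := ih (i + 1) h; omega

-- once the index is at or past the target, classification agrees with the seen=true pass
theorem ecn_classify_seen (slug : String) (es : List (List (String × String))) (i ti : Nat)
    (h : ti ≤ i) : ecn_classify slug (some ti) es i = ecn_onepass slug true es := by
  induction es generalizing i with
  | nil => rfl
  | cons e rest ih =>
    simp only [ecn_classify, ecn_onepass]
    have hrec := ih (i + 1) (by omega)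
    by_cases hf : ((PySem.Dict.mk e).get? "company") = none ∨ ((PySem.Dict.mk e).get? "company") = some ""
    · by_cases hm : PySem.Chars.isIn slug.toList (PySem.Chars.lower ((((PySem.Dict.mk e).get? "company")).getD "").toList) = true
      · simp [hf, hm, hrec]
      · simp [hf, hm, hrec]
    · by_cases hm : PySem.Chars.isIn slug.toList (PySem.Chars.lower ((((PySem.Dict.mk e).get? "company")).getD "").toList) = true
      · simp [hf, hm, hrec]
      · simp [hf, hm, hrec, Nat.not_lt.mpr h]

-- main invariant: classifying against the first match found from index i
-- equals the one-pass fold started with seen = false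
theorem ecn_main (slug : String) (es : List (List (String × String))) (i : Nat) :
    ecn_classify slug (ecn_findTarget slug es i) es i = ecn_onepass slug false es := by
  induction es generalizing i with
  | nil => rfl
  | cons e rest ih =>
    by_cases hm : PySem.Chars.isIn slug.toList (PySem.Chars.lower ((((PySem.Dict.mk e).get? "company")).getD "").toList) = true
    · -- head matches: target_idx = some i; classify skips the head either way
      have hfind : ecn_findTarget slug (e :: rest) i = some i := by
        simp [ecn_findTarget, hm]
      rw [hfind]
      have hseen := ecn_classify_seen slug rest (i + 1) i (by omega)
      by_cases hf : ((PySem.Dict.mk e).get? "company") = none ∨ ((PySem.Dict.mk e).get? "company") = some ""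
      · simp [ecn_classify, ecn_onepass, hf, hm, hseen]
      · simp [ecn_classify, ecn_onepass, hf, hm, hseen]
    · -- head does not match: the search continues in the tail
      have hfind : ecn_findTarget slug (e :: rest) i = ecn_findTarget slug rest (i + 1) := by
        simp [ecn_findTarget, hm]
      rw [hfind]
      by_cases hf : ((PySem.Dict.mk e).get? "company") = none ∨ ((PySem.Dict.mk e).get? "company") = some ""
      · simp [ecn_classify, ecn_onepass, hf, hm, ih (i + 1)]
      · -- non-falsy, non-target entry before any match: 'after' in both programs
        cases hft : ecn_findTarget slug rest (i + 1) with
        | none => simp [ecn_classify, ecn_onepass, hf, hm, hft, ← ih (i + 1)]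
        | some t =>
          have hlt : i < t := by have := ecn_findTarget_ge slug rest (i + 1) t hft; omega
          simp [ecn_classify, ecn_onepass, hf, hm, hft, hlt, ← ih (i + 1)]

-- ===== VERDICT (by name: the statement is the Claim_ definition above) =====
theorem extract_company_names_spec : Claim_equal_extract_company_names := by
  intro profile target_domain keyword _
  unfold Spec_extract_company_names extract_company_names extract_company_names_alt
  simp only [ecn_main]
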